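-- pv_equiv track=rewrite | github.com/RyanHam04/AdventOfCode | 2024/day8/day8_part2.py | calculate_line_of_antinodes
-- ===== SOURCE A (Python) =====
-- from typing import Dict, Tuple, List, Set
-- from math import gcd
--
-- def calculate_line_of_antinodes(
--     all_locations: Dict[str, List[Tuple[int, int]]],
--     data: List[List[str]],
-- ) -> Set[Tuple[int, int]]:
--     """
--     Instead of a single antinode, this function generates a
--     line of antinodes, based on y = (dy/dx)*x + b, so there is
--     a diagonal of antinodes, both on the upper boundary and lower boundary.
--
--
--     Args:
--         all_locations (Dict[str, List[Tuple[int, int]]]):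
--         A dictionary where the characters are the keys,
--             and the coordinates are the values
--         data (List[List[str]]): The data in a nested list.
--
--     Returns:
--         Set[Tuple[int, int]]: The set containing all antinodes,
--         created in diagonals.
--     """
--     map_height = len(data)
--     map_width = len(data[0])
--     all_antinodes = set()
--
--     for _, coordinates in all_locations.items():
--         if len(coordinates) == 1:
--             all_antinodes.add(coordinates[0])
--             continue
--
--         all_antinodes.update(coordinates)
--
--         for i, (x1, y1) in enumerate(coordinates):
--             for j in range(i + 1, len(coordinates)):
--                 x2, y2 = coordinates[j]
--
--                 dx = x2 - x1
--                 dy = y2 - y1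
--                 common_divisor = abs(gcd(dx, dy))
--                 dx = dx // common_divisor
--                 dy = dy // common_divisor
--
--                 current_x, current_y = x1 + dx, y1 + dy
--                 while (0 <= current_x < map_width
--                        and 0 <= current_y < map_height):
--                     all_antinodes.add((current_x, current_y))
--                     current_x += dx
--                     current_y += dy
--
--                 current_x, current_y = x1 - dx, y1 - dy
--                 while (0 <= current_x < map_width
--                        and 0 <= current_y < map_height):
--                     all_antinodes.add((current_x, current_y))
--                     current_x -= dx
--                     current_y -= dy
--
--     return all_antinodes
-- ===== SOURCE B (Python) =====
-- from math import gcd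
--
--
-- def _limit(c, d, bound, inf):
--     # Largest t with 0 <= c + t*d < bound, given 0 <= c + d < bound (closed form;
--     # inf is an unreachable cap used when d == 0, i.e. this axis never binds).
--     if d > 0:
--         return (bound - 1 - c) // d
--     if d < 0:
--         return c // -d
--     return inf
--
--
-- def _ray(x, y, dx, dy, w, h):
--     # All in-bounds points x,y + t*(dx,dy) for t = 1, 2, ..., in order, from the
--     # closed-form stretch length instead of stepping until out of bounds.
--     if not (0 <= x + dx < w and 0 <= y + dy < h):
--         return []
--     t_max = min(_limit(x, dx, w, w + h), _limit(y, dy, h, w + h))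
--     return [(x + t * dx, y + t * dy) for t in range(1, t_max + 1)]
--
--
-- def calculate_line_of_antinodes(all_locations, data):
--     # Canonicalize each pair's line as a ray key (anchor + sign-normalized primitive
--     # direction); enumerate the points of each DISTINCT ray only once, via a
--     # closed-form segment length, then build the set in one shot at the end.
--     h, w = len(data), len(data[0])
--     pts = []
--     for coords in all_locations.values():
--         pts += coords
--         seen = set()
--         for i, (x1, y1) in enumerate(coords):
--             for x2, y2 in coords[i + 1:]:
--                 g = gcd(x2 - x1, y2 - y1)
--                 dx, dy = (x2 - x1) // g, (y2 - y1) // g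
--                 key = (x1, y1) + ((-dx, -dy) if dx < 0 or (dx == 0 and dy < 0) else (dx, dy))
--                 if key not in seen:
--                     seen.add(key)
--                     pts += _ray(x1, y1, dx, dy, w, h)
--                     pts += _ray(x1, y1, -dx, -dy, w, h)
--     return set(pts)
-- ===== Notes on version B (the rewrite author's own statement) =====
-- stated objective: alternative
-- what changed: B canonicalizes each pair's line as a ray key (anchor + sign-normalized primitive direction) kept in a hash set so each distinct ray's points are enumerated only once via a closed-form segment length, and the result set is built in one shot from a flat point list, instead of A's per-pair stepwise while-walks that re-insert every collinear pair's whole line into the set.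
import Mathlib
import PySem

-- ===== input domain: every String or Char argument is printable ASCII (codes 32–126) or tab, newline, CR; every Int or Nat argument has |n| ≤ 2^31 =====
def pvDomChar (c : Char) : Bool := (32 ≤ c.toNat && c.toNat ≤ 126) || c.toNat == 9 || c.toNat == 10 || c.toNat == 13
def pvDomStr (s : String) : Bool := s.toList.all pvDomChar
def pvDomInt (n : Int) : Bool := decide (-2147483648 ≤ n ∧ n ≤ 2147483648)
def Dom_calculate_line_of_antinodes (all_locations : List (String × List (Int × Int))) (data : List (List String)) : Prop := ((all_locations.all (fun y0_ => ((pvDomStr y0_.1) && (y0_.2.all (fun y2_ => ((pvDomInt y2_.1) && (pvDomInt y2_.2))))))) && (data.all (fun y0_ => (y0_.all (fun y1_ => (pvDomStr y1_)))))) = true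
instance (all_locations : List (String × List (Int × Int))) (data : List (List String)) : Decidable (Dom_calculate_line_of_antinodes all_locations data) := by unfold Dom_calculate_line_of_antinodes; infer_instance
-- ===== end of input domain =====

-- B canonicalizes each pair's line as a ray key (anchor + sign-normalized primitive direction),
-- enumerates each DISTINCT ray once via a closed-form segment length, and builds the set once at
-- the end — instead of A's per-step while-walks re-inserting every pair's whole line into a set.

-- the dict argument, normalised exactly as Python builds a dict from key/value pairs
-- (first key position, last value wins); shared input decoding for both ports
def pvNormLocs (all_locations : List (String × List (Int × Int))) : PySem.Dict String (List (Int × Int)) :=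
  PySem.Dict.ofList all_locations

-- ===== PORT A =====
-- the two 'while 0 <= current ... : add; step' loops; fuel is only a totality guard
-- (the walk stays in the W×H box and moves strictly, so (W+H).toNat+2 steps always suffice)
def pvWalkA (W H dx dy : Int) : Nat → Int → Int → List (Int × Int) → List (Int × Int)
  | 0, _, _, s => s
  | n + 1, x, y, s =>
    if 0 ≤ x ∧ x < W ∧ 0 ≤ y ∧ y < H then
      pvWalkA W H dx dy n (x + dx) (y + dy) (PySem.Set.add s (x, y))
    else s

-- body of the inner j-loop for the pair (p, q) = (coordinates[i], coordinates[j])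
def pvPairA (W H : Int) (fuel : Nat) (p q : Int × Int) (s : List (Int × Int)) : List (Int × Int) :=
  let dx := q.1 - p.1
  let dy := q.2 - p.2
  let cd : Int := |((Int.gcd dx dy : Nat) : Int)|
  let dx := PySem.Int.floordiv dx cd
  let dy := PySem.Int.floordiv dy cd
  let s := pvWalkA W H dx dy fuel (p.1 + dx) (p.2 + dy) s
  pvWalkA W H (-dx) (-dy) fuel (p.1 - dx) (p.2 - dy) s

-- 'for i, (x1, y1) in enumerate(coordinates): for j in range(i+1, len(...))':
-- coordinates[j] for j = i+1.. is exactly the tail after position i, visited in order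
def pvPairLoopA (W H : Int) (fuel : Nat) : List (Int × Int) → List (Int × Int) → List (Int × Int)
  | [], s => s
  | p :: rest, s => pvPairLoopA W H fuel rest (rest.foldl (fun s q => pvPairA W H fuel p q s) s)

def pvGroupA (W H : Int) (fuel : Nat) (coords : List (Int × Int)) (s : List (Int × Int)) : List (Int × Int) :=
  if coords.length = 1 then PySem.Set.add s (coords.headD (0, 0))
  else pvPairLoopA W H fuel coords (PySem.Set.update s coords)

def calculate_line_of_antinodes (all_locations : List (String × List (Int × Int))) (data : List (List String)) : List (Int × Int) :=
  let map_height := (data.length : Int)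
  let map_width := (((data.headD []).length : Nat) : Int)   -- data[0]; Pre_ excludes data = []
  let fuel := (map_width + map_height).toNat + 2
  ((pvNormLocs all_locations).items).foldl
    (fun s kv => pvGroupA map_width map_height fuel kv.2 s) PySem.Set.empty

-- ===== PORT B =====
def pvLimit (c d bound inf : Int) : Int :=
  if d > 0 then PySem.Int.floordiv (bound - 1 - c) d
  else if d < 0 then PySem.Int.floordiv c (-d)
  else inf

def pvRay (x y dx dy w h : Int) : List (Int × Int) :=
  if 0 ≤ x + dx ∧ x + dx < w ∧ 0 ≤ y + dy ∧ y + dy < h then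
    let tmax := min (pvLimit x dx w (w + h)) (pvLimit y dy h (w + h))
    (PySem.List.pyRange 1 (tmax + 1) 1).map (fun t => (x + t * dx, y + t * dy))
  else []

-- the pair's primitive direction (dx, dy) = ((x2-x1)//g, (y2-y1)//g)
def pvDirB (p q : Int × Int) : Int × Int :=
  let g : Int := ((Int.gcd (q.1 - p.1) (q.2 - p.2) : Nat) : Int)
  (PySem.Int.floordiv (q.1 - p.1) g, PySem.Int.floordiv (q.2 - p.2) g)

-- both in-bounds stretches of the pair's line, from the anchor p
def pvPairB (w h : Int) (p q : Int × Int) : List (Int × Int) :=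
  let d := pvDirB p q
  pvRay p.1 p.2 d.1 d.2 w h ++ pvRay p.1 p.2 (-d.1) (-d.2) w h

-- canonical ray key: anchor plus sign-normalized primitive direction
def pvKeyB (p q : Int × Int) : Int × Int × Int × Int :=
  let d := pvDirB p q
  if d.1 < 0 ∨ (d.1 = 0 ∧ d.2 < 0) then (p.1, p.2, -d.1, -d.2) else (p.1, p.2, d.1, d.2)

-- 'if key not in seen: seen.add(key); pts += ray(d); pts += ray(-d)'
def pvStepB (w h : Int) (p : Int × Int)
    (st : List (Int × Int × Int × Int) × List (Int × Int)) (q : Int × Int) :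
    List (Int × Int × Int × Int) × List (Int × Int) :=
  let key := pvKeyB p q
  if key ∈ st.1 then st
  else (PySem.Set.add st.1 key, st.2 ++ pvPairB w h p q)

def pvPairLoopB (w h : Int) :
    List (Int × Int) → List (Int × Int × Int × Int) × List (Int × Int) →
      List (Int × Int × Int × Int) × List (Int × Int)
  | [], st => st
  | p :: rest, st => pvPairLoopB w h rest (rest.foldl (pvStepB w h p) st)

def pvGroupPtsB (w h : Int) (coords : List (Int × Int)) (pts : List (Int × Int)) : List (Int × Int) :=
  (pvPairLoopB w h coords (PySem.Set.empty, pts ++ coords)).2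

def calculate_line_of_antinodes_alt (all_locations : List (String × List (Int × Int))) (data : List (List String)) : List (Int × Int) :=
  let h := (data.length : Int)
  let w := (((data.headD []).length : Nat) : Int)
  let pts := ((pvNormLocs all_locations).items).foldl (fun pts kv => pvGroupPtsB w h kv.2 pts) []
  PySem.Set.ofList pts

-- ===== PRECONDITION & SPEC =====
-- Pre_ excludes exactly the raising inputs: data = [] (IndexError on data[0]) and any
-- repeated coordinate inside one frequency's (dict-normalised) list, on which
-- gcd(0,0) = 0 makes A raise ZeroDivisionError.
def Pre_calculate_line_of_antinodes (all_locations : List (String × List (Int × Int))) (data : List (List String)) : Prop :=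
  data ≠ [] ∧ ∀ kv ∈ (pvNormLocs all_locations).items, kv.2.Nodup
instance (all_locations : List (String × List (Int × Int))) (data : List (List String)) : Decidable (Pre_calculate_line_of_antinodes all_locations data) := by unfold Pre_calculate_line_of_antinodes; infer_instance

def pvWitness_calculate_line_of_antinodes : (List (String × List (Int × Int))) × List (List String) :=
  ([("a", [(0, 0), (2, 1)])], [["a", "b", "c"], ["d", "e", "f"]])

def Spec_calculate_line_of_antinodes (all_locations : List (String × List (Int × Int))) (data : List (List String)) (out : List (Int × Int)) : Prop := out = calculate_line_of_antinodes_alt all_locations data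
instance (all_locations : List (String × List (Int × Int))) (data : List (List String)) (out : List (Int × Int)) : Decidable (Spec_calculate_line_of_antinodes all_locations data out) := by unfold Spec_calculate_line_of_antinodes; infer_instance

-- ===== CLAIM (what is proved, stated in full; the proofs are below) =====
def Claim_equal_calculate_line_of_antinodes : Prop := ∀ (all_locations : List (String × List (Int × Int))) (data : List (List String)), Dom_calculate_line_of_antinodes all_locations data → Pre_calculate_line_of_antinodes all_locations data → Spec_calculate_line_of_antinodes all_locations data (calculate_line_of_antinodes all_locations data)

-- ===== LEMMAS AND PROOFS =====

-- the in-bounds predicate along the line through (x,y) with step (dx,dy), at parameter t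
def pvInb (W H x y dx dy t : Int) : Prop :=
  0 ≤ x + t * dx ∧ x + t * dx < W ∧ 0 ≤ y + t * dy ∧ y + t * dy < H

-- per-axis characterisation: for t ≥ 1 the axis bound holds iff t ≤ pvLimit … (d ≠ 0)
lemma pvAxis_char (c d B S t : Int) (hd : d ≠ 0) (h0 : 0 ≤ c + d) (h1 : c + d < B) (ht : 1 ≤ t) :
    (0 ≤ c + t * d ∧ c + t * d < B) ↔ t ≤ pvLimit c d B S := by
  unfold pvLimit
  rcases lt_or_gt_of_ne hd with hneg | hpos
  · rw [if_neg (by omega), if_pos hneg, PySem.Int.le_floordiv_iff_mul_le (by omega)]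
    constructor
    · rintro ⟨ha, _⟩; nlinarith
    · intro h
      have h2 : t * d ≤ 1 * d := by
        apply mul_le_mul_of_nonpos_right _ (by omega); omega
      constructor <;> nlinarith
  · rw [if_pos hpos, PySem.Int.le_floordiv_iff_mul_le hpos]
    constructor
    · rintro ⟨_, hb⟩; nlinarith [Int.add_one_le_iff.mpr hb]
    · intro h
      have h2 : 1 * d ≤ t * d := by
        apply mul_le_mul_of_nonneg_right _ (by omega); omega
      constructor <;> nlinarith

-- the per-axis limit never exceeds the sentinel
lemma pvLimit_le (c d B S : Int) (h0 : 0 ≤ c + d) (h1 : c + d < B) (hBS : B ≤ S) (_hS : 0 ≤ S) :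
    pvLimit c d B S ≤ S := by
  unfold pvLimit
  rcases lt_trichotomy d 0 with hneg | hz | hpos
  · rw [if_neg (by omega), if_pos hneg]
    have : PySem.Int.floordiv c (-d) < S + 1 := by
      rw [PySem.Int.floordiv_lt_iff_lt_mul (by omega)]; nlinarith
    omega
  · simp [hz]
  · rw [if_pos hpos]
    have : PySem.Int.floordiv (B - 1 - c) d < S + 1 := by
      rw [PySem.Int.floordiv_lt_iff_lt_mul hpos]; nlinarith
    omega

-- combined characterisation at the stretch length T = min of the two limits
lemma pvChar (W H x y dx dy : Int) (hd : ¬(dx = 0 ∧ dy = 0)) (h1 : pvInb W H x y dx dy 1) :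
    ∀ t, 1 ≤ t → (pvInb W H x y dx dy t ↔ t ≤ min (pvLimit x dx W (W + H)) (pvLimit y dy H (W + H))) := by
  intro t ht
  obtain ⟨hx0, hx1, hy0, hy1⟩ := h1
  rw [one_mul] at hx0 hx1 hy0 hy1
  unfold pvInb
  by_cases hdx : dx = 0
  · have hdy : dy ≠ 0 := by tauto
    have hlim : pvLimit y dy H (W + H) ≤ W + H := pvLimit_le _ _ _ _ hy0 hy1 (by omega) (by omega)
    have hx : pvLimit x dx W (W + H) = W + H := by simp [pvLimit, hdx]
    rw [le_min_iff, hx]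
    have := pvAxis_char y dy H (W + H) t hdy hy0 hy1 ht
    subst hdx
    constructor
    · rintro ⟨_, _, h3, h4⟩; exact ⟨by omega, this.mp ⟨h3, h4⟩⟩
    · rintro ⟨_, h2⟩
      have := this.mpr h2; simp only [mul_zero]; omega
  · by_cases hdy : dy = 0
    · have hlim : pvLimit x dx W (W + H) ≤ W + H := pvLimit_le _ _ _ _ hx0 hx1 (by omega) (by omega)
      have hy : pvLimit y dy H (W + H) = W + H := by simp [pvLimit, hdy]
      rw [le_min_iff, hy]
      have := pvAxis_char x dx W (W + H) t hdx hx0 hx1 ht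
      subst hdy
      constructor
      · rintro ⟨h3, h4, _, _⟩; exact ⟨this.mp ⟨h3, h4⟩, by omega⟩
      · rintro ⟨h2, _⟩
        have := this.mpr h2; simp only [mul_zero]; omega
    · rw [le_min_iff,
        ← pvAxis_char x dx W (W + H) t hdx hx0 hx1 ht,
        ← pvAxis_char y dy H (W + H) t hdy hy0 hy1 ht]
      tauto

-- the walk from parameter t collects exactly the range t..T, in order
lemma pvWalk_range (W H x y dx dy T : Int)
    (hchar : ∀ t, 1 ≤ t → (pvInb W H x y dx dy t ↔ t ≤ T)) :
    ∀ (f : Nat) (t : Int) (s : List (Int × Int)), 1 ≤ t → T - t + 1 < (f : Int) →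
      pvWalkA W H dx dy f (x + t * dx) (y + t * dy) s
        = ((PySem.List.pyRange t (T + 1) 1).map (fun u => (x + u * dx, y + u * dy))).foldl PySem.Set.add s := by
  intro f
  induction f with
  | zero =>
    intro t s ht hf
    rw [PySem.List.pyRange_one_eq_nil (by exact_mod_cast by omega)]
    rfl
  | succ n ih =>
    intro t s ht hf
    by_cases hT : t ≤ T
    · have hinb : pvInb W H x y dx dy t := (hchar t ht).mpr hT
      obtain ⟨a1, a2, a3, a4⟩ := hinb
      rw [pvWalkA, if_pos ⟨a1, a2, a3, a4⟩]
      rw [PySem.List.pyRange_one_cons (by omega)]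
      simp only [List.map_cons, List.foldl_cons]
      have e1 : x + t * dx + dx = x + (t + 1) * dx := by ring
      have e2 : y + t * dy + dy = y + (t + 1) * dy := by ring
      rw [e1, e2, ih (t + 1) _ (by omega) (by push_cast at hf ⊢; omega)]
    · have hinb : ¬ pvInb W H x y dx dy t := by
        intro h; exact hT ((hchar t ht).mp h)
      rw [pvWalkA, if_neg (by unfold pvInb at hinb; tauto),
        PySem.List.pyRange_one_eq_nil (by omega)]
      rfl

-- one direction of one pair: A's while-walk equals folding B's closed-form ray
lemma pvRay_walk (W H dx dy x y : Int) (s : List (Int × Int)) (hd : ¬(dx = 0 ∧ dy = 0)) :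
    pvWalkA W H dx dy ((W + H).toNat + 2) (x + dx) (y + dy) s
      = (pvRay x y dx dy W H).foldl PySem.Set.add s := by
  unfold pvRay
  by_cases h1 : 0 ≤ x + dx ∧ x + dx < W ∧ 0 ≤ y + dy ∧ y + dy < H
  · rw [if_pos h1]
    have h1' : pvInb W H x y dx dy 1 := by
      unfold pvInb; simp only [one_mul]; exact h1
    have hchar := pvChar W H x y dx dy hd h1'
    set T := min (pvLimit x dx W (W + H)) (pvLimit y dy H (W + H)) with hTdef
    obtain ⟨hx0, hx1, hy0, hy1⟩ := h1
    have hTle : T ≤ W + H := by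
      have := pvLimit_le x dx W (W + H) hx0 hx1 (by omega) (by omega)
      omega
    have e1 : x + dx = x + 1 * dx := by ring
    have e2 : y + dy = y + 1 * dy := by ring
    rw [e1, e2, pvWalk_range W H x y dx dy T hchar ((W + H).toNat + 2) 1 s le_rfl
      (by push_cast; omega)]
  · rw [if_neg h1]
    show pvWalkA W H dx dy (_ + 1) _ _ s = _
    rw [pvWalkA, if_neg h1]
    rfl

-- reducing a nonzero vector by its gcd keeps it nonzero
lemma pvRed_nz (a b : Int) (h : ¬(a = 0 ∧ b = 0)) :
    ¬(PySem.Int.floordiv a ((Int.gcd a b : Nat) : Int) = 0 ∧ PySem.Int.floordiv b ((Int.gcd a b : Nat) : Int) = 0) := by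
  have hg : 0 < ((Int.gcd a b : Nat) : Int) := by
    have : 0 < Int.gcd a b := Int.gcd_pos_iff.mpr (by tauto)
    exact_mod_cast this
  rintro ⟨ha, hb⟩
  rw [PySem.Int.floordiv_eq_ediv_of_pos hg] at ha hb
  have hda := Int.ediv_mul_cancel (Int.gcd_dvd_left a b)
  have hdb := Int.ediv_mul_cancel (Int.gcd_dvd_right a b)
  rw [ha] at hda; rw [hb] at hdb
  simp at hda hdb
  exact h ⟨hda.symm, hdb.symm⟩

-- a pair of distinct points has a nonzero primitive direction
lemma pvDirB_nz (p q : Int × Int) (hpq : p ≠ q) : ¬((pvDirB p q).1 = 0 ∧ (pvDirB p q).2 = 0) := by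
  apply pvRed_nz
  rintro ⟨h1, h2⟩
  exact hpq (Prod.ext_iff.mpr ⟨by omega, by omega⟩).symm

-- one pair: A's two walks equal folding B's two rays
lemma pvPair_eq (W H : Int) (p q : Int × Int) (hpq : p ≠ q) (s : List (Int × Int)) :
    pvPairA W H ((W + H).toNat + 2) p q s = (pvPairB W H p q).foldl PySem.Set.add s := by
  have habs : |((Int.gcd (q.1 - p.1) (q.2 - p.2) : Nat) : Int)| = ((Int.gcd (q.1 - p.1) (q.2 - p.2) : Nat) : Int) :=
    abs_of_nonneg (Int.natCast_nonneg _)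
  have hnz := pvDirB_nz p q hpq
  simp only [pvPairA, pvPairB, pvDirB] at hnz ⊢
  rw [habs]
  rw [List.foldl_append]
  rw [pvRay_walk _ _ _ _ _ _ _ hnz]
  have e1 : p.1 - PySem.Int.floordiv (q.1 - p.1) ((Int.gcd (q.1 - p.1) (q.2 - p.2) : Nat) : Int)
      = p.1 + -(PySem.Int.floordiv (q.1 - p.1) ((Int.gcd (q.1 - p.1) (q.2 - p.2) : Nat) : Int)) := by ring
  have e2 : p.2 - PySem.Int.floordiv (q.2 - p.2) ((Int.gcd (q.1 - p.1) (q.2 - p.2) : Nat) : Int)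
      = p.2 + -(PySem.Int.floordiv (q.2 - p.2) ((Int.gcd (q.1 - p.1) (q.2 - p.2) : Nat) : Int)) := by ring
  rw [e1, e2, pvRay_walk _ _ _ _ _ _ _ (by simp only [neg_eq_zero]; exact hnz)]

-- the points named by a canonical ray key (both stretches from its anchor)
def pvKeyElems (w h : Int) (k : Int × Int × Int × Int) : List (Int × Int) :=
  pvRay k.1 k.2.1 k.2.2.1 k.2.2.2 w h ++ pvRay k.1 k.2.1 (-k.2.2.1) (-k.2.2.2) w h

-- a pair's contribution has exactly the elements named by its canonical key
lemma pvPairB_mem_key (w h : Int) (p q : Int × Int) (e : Int × Int) :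
    e ∈ pvPairB w h p q ↔ e ∈ pvKeyElems w h (pvKeyB p q) := by
  unfold pvPairB pvKeyB pvKeyElems
  by_cases hc : (pvDirB p q).1 < 0 ∨ ((pvDirB p q).1 = 0 ∧ (pvDirB p q).2 < 0)
  · rw [if_pos hc]
    simp only [List.mem_append, neg_neg]
    tauto
  · rw [if_neg hc]

-- membership in a fold of Set.add
lemma pvMem_foldl_add (s l : List (Int × Int)) (e : Int × Int) :
    e ∈ List.foldl PySem.Set.add s l ↔ e ∈ s ∨ e ∈ l := by
  have := PySem.Set.mem_foldl_add (f := (id : Int × Int → Int × Int)) (l := l) (s := s) (y := e)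
  simpa using this

-- folding Set.add over already-present elements is a no-op
lemma pvFoldl_add_of_subset (s : List (Int × Int)) :
    ∀ l : List (Int × Int), (∀ e ∈ l, e ∈ s) → List.foldl PySem.Set.add s l = s := by
  intro l
  induction l with
  | nil => intro _; rfl
  | cons x xs ih =>
    intro hsub
    simp only [List.foldl_cons]
    rw [PySem.Set.add_of_mem (hsub x (by simp)), ih (fun e he => hsub e (by simp [he]))]

-- the dedup invariant: every key already seen has all its points in pts
def pvInv (w h : Int) (seen : List (Int × Int × Int × Int)) (pts : List (Int × Int)) : Prop :=
  ∀ k ∈ seen, ∀ e ∈ pvKeyElems w h k, e ∈ pts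

-- the inner j-loop: A's per-pair walks from the set built over pts equal B's deduped appends
lemma pvInner_eq (W H : Int) (p : Int × Int) :
    ∀ (rest : List (Int × Int)), (∀ q ∈ rest, p ≠ q) →
    ∀ (seen : List (Int × Int × Int × Int)) (pts s0 : List (Int × Int)), pvInv W H seen pts →
      rest.foldl (fun s q => pvPairA W H ((W + H).toNat + 2) p q s) (List.foldl PySem.Set.add s0 pts)
        = List.foldl PySem.Set.add s0 (rest.foldl (pvStepB W H p) (seen, pts)).2
      ∧ pvInv W H (rest.foldl (pvStepB W H p) (seen, pts)).1 (rest.foldl (pvStepB W H p) (seen, pts)).2 := by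
  intro rest
  induction rest with
  | nil => intro _ seen pts s0 hinv; exact ⟨rfl, hinv⟩
  | cons q rest' ih =>
    intro hp seen pts s0 hinv
    simp only [List.foldl_cons]
    rw [pvPair_eq W H p q (hp q (by simp)) _]
    by_cases hmem : pvKeyB p q ∈ seen
    · have hskip : pvStepB W H p (seen, pts) q = (seen, pts) := by
        unfold pvStepB; rw [if_pos hmem]
      have hno : List.foldl PySem.Set.add (List.foldl PySem.Set.add s0 pts) (pvPairB W H p q)
          = List.foldl PySem.Set.add s0 pts := by
        apply pvFoldl_add_of_subset
        intro e he
        rw [pvMem_foldl_add]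
        exact Or.inr (hinv _ hmem e ((pvPairB_mem_key W H p q e).mp he))
      rw [hno, hskip]
      exact ih (fun r hr => hp r (by simp [hr])) seen pts s0 hinv
    · have hstep : pvStepB W H p (seen, pts) q
          = (PySem.Set.add seen (pvKeyB p q), pts ++ pvPairB W H p q) := by
        unfold pvStepB; rw [if_neg hmem]
      rw [hstep, ← List.foldl_append]
      apply ih (fun r hr => hp r (by simp [hr]))
      intro k hk e he
      rw [PySem.Set.mem_add] at hk
      rcases hk with hk | hk
      · exact List.mem_append_left _ (hinv k hk e he)
      · subst hk
        exact List.mem_append_right _ ((pvPairB_mem_key W H p q e).mpr he)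

-- the outer i-loop over anchors
lemma pvPairLoop_eq (W H : Int) :
    ∀ (coords : List (Int × Int)), coords.Nodup →
    ∀ (seen : List (Int × Int × Int × Int)) (pts s0 : List (Int × Int)), pvInv W H seen pts →
      pvPairLoopA W H ((W + H).toNat + 2) coords (List.foldl PySem.Set.add s0 pts)
        = List.foldl PySem.Set.add s0 (pvPairLoopB W H coords (seen, pts)).2 := by
  intro coords
  induction coords with
  | nil => intro _ seen pts s0 _; rfl
  | cons p rest ih =>
    intro hnd seen pts s0 hinv
    rw [List.nodup_cons] at hnd
    simp only [pvPairLoopA, pvPairLoopB]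
    obtain ⟨heq, hinv'⟩ :=
      pvInner_eq W H p rest (fun q hq => by rintro rfl; exact hnd.1 hq) seen pts s0 hinv
    rcases hst : rest.foldl (pvStepB W H p) (seen, pts) with ⟨st1, st2⟩
    rw [hst] at heq hinv'
    rw [heq]
    exact ih hnd.2 st1 st2 s0 hinv'

lemma pvGroup_eq (W H : Int) (coords : List (Int × Int)) (hnd : coords.Nodup) (pts s0 : List (Int × Int)) :
    pvGroupA W H ((W + H).toNat + 2) coords (List.foldl PySem.Set.add s0 pts)
      = List.foldl PySem.Set.add s0 (pvGroupPtsB W H coords pts) := by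
  unfold pvGroupA pvGroupPtsB
  by_cases hlen : coords.length = 1
  · match coords, hlen with
    | [c], _ =>
      have hc : [c].length = 1 := rfl
      rw [if_pos hc]
      show _ = List.foldl _ s0 (pvPairLoopB W H [c] (PySem.Set.empty, pts ++ [c])).2
      have : pvPairLoopB W H [c] (PySem.Set.empty, pts ++ [c]) = (PySem.Set.empty, pts ++ [c]) := rfl
      rw [this]
      show PySem.Set.add (List.foldl PySem.Set.add s0 pts) c = _
      rw [List.foldl_append]
      rfl
  · rw [if_neg hlen]
    have hupd : PySem.Set.update (List.foldl PySem.Set.add s0 pts) coords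
        = List.foldl PySem.Set.add s0 (pts ++ coords) := by
      rw [List.foldl_append]; rfl
    rw [hupd]
    exact pvPairLoop_eq W H coords hnd PySem.Set.empty (pts ++ coords) s0
      (fun k hk => by simp [PySem.Set.empty] at hk)

lemma pvTop_eq (W H : Int) (groups : List (String × List (Int × Int)))
    (hnd : ∀ kv ∈ groups, kv.2.Nodup) :
    ∀ (pts s0 : List (Int × Int)),
      groups.foldl (fun s kv => pvGroupA W H ((W + H).toNat + 2) kv.2 s) (List.foldl PySem.Set.add s0 pts)
        = List.foldl PySem.Set.add s0 (groups.foldl (fun pts kv => pvGroupPtsB W H kv.2 pts) pts) := by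
  induction groups with
  | nil => intro pts s0; rfl
  | cons g rest ih =>
    intro pts s0
    simp only [List.foldl_cons]
    rw [pvGroup_eq W H g.2 (hnd g (by simp)) pts s0]
    exact ih (fun kv hkv => hnd kv (by simp [hkv])) _ s0

-- ===== VERDICT (by name: the statement is the Claim_ definition above) =====
theorem calculate_line_of_antinodes_spec : Claim_equal_calculate_line_of_antinodes := by
  intro all_locations data _hdom hpre
  unfold Spec_calculate_line_of_antinodes
  simp only [calculate_line_of_antinodes, calculate_line_of_antinodes_alt]
  rw [PySem.Set.ofList_eq_foldl]
  exact pvTop_eq (((data.headD []).length : Nat) : Int) (data.length : Int)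
    ((pvNormLocs all_locations).items) hpre.2 [] []
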